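-- pv_equiv track=rewrite | github.com/purseclab/ShadowAuth | ecu_firmware_analysis/CANTxFilter.py | aggregate_by_mmio_id
-- ===== SOURCE A (Python) =====
-- def aggregate_by_mmio_id(bb_mmio_cnt):
--   mmio_cnt = {}
--   bb_ids = bb_mmio_cnt.keys()
--   for bb_id in bb_ids:
--     bb_mmio_addrs = bb_mmio_cnt[bb_id].keys()
--     for bb_mmio_addr in bb_mmio_addrs:
--       mmio_cnt[bb_mmio_addr] = mmio_cnt.get(bb_mmio_addr, 0) + bb_mmio_cnt[bb_id][bb_mmio_addr]
--
--   return mmio_cnt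
-- ===== SOURCE B (Python) =====
-- def aggregate_by_mmio_id(bb_mmio_cnt):
--     # two-pass: first the addresses in first-appearance order, then one sum per address
--     order = []
--     for inner in bb_mmio_cnt.values():
--         for addr in inner:
--             if addr not in order:
--                 order.append(addr)
--     return {addr: sum(inner.get(addr, 0) for inner in bb_mmio_cnt.values())
--             for addr in order}
-- ===== Notes on version B (the rewrite author's own statement) =====
-- stated objective: alternative
-- what changed: replaces A's single-pass get-and-accumulate dict build with a two-pass decomposition: collect the mmio addresses in first-appearance order, then compute each total with one per-address sum over all inner dicts
import Mathlib
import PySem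

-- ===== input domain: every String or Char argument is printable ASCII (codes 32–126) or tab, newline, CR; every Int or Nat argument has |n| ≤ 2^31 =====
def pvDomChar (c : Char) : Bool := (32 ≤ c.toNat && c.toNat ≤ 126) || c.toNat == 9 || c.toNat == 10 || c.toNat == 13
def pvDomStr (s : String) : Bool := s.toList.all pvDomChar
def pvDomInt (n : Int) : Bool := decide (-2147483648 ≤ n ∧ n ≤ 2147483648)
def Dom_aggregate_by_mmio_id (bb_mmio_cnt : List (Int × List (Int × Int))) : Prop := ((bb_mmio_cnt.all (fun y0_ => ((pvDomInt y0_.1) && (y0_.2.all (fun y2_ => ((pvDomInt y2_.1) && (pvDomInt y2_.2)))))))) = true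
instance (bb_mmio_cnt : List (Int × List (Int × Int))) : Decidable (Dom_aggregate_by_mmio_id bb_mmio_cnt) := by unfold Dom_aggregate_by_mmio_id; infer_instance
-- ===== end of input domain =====

-- ===== PORT A =====
-- Iterating a Python dict's keys and indexing each key is exactly iterating its items;
-- Pre_ below restricts to duplicate-free association lists, where this reading is exact.
def aggregate_by_mmio_id (bb_mmio_cnt : List (Int × List (Int × Int))) : List (Int × Int) :=
  (bb_mmio_cnt.foldl
    (fun (mmio_cnt : PySem.Dict Int Int) p =>
      p.2.foldl (fun mc q => mc.insert q.1 (mc.getD q.1 0 + q.2)) mmio_cnt)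
    PySem.Dict.empty).items

-- ===== PORT B =====
def aggregate_by_mmio_id_alt (bb_mmio_cnt : List (Int × List (Int × Int))) : List (Int × Int) :=
  let order : List Int :=
    bb_mmio_cnt.foldl
      (fun (ord : List Int) p =>
        p.2.foldl (fun ord q => if q.1 ∈ ord then ord else ord ++ [q.1]) ord) []
  order.map (fun a =>
    (a, bb_mmio_cnt.foldl (fun s p => s + (PySem.Dict.mk p.2).getD a 0) 0))

-- ===== PRECONDITION & SPEC =====
-- Pre_ excludes association lists with duplicate outer or inner keys: those do not
-- represent Python dicts, so A never receives them.
def Pre_aggregate_by_mmio_id (bb_mmio_cnt : List (Int × List (Int × Int))) : Prop :=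
  (bb_mmio_cnt.map Prod.fst).Nodup ∧ ∀ p ∈ bb_mmio_cnt, (p.2.map Prod.fst).Nodup
instance (bb_mmio_cnt : List (Int × List (Int × Int))) : Decidable (Pre_aggregate_by_mmio_id bb_mmio_cnt) := by
  unfold Pre_aggregate_by_mmio_id; infer_instance

def pvWitness_aggregate_by_mmio_id : (List (Int × List (Int × Int))) :=
  [(1, [(10, 2), (11, 3)]), (2, [(10, 5)])]

def Spec_aggregate_by_mmio_id (bb_mmio_cnt : List (Int × List (Int × Int))) (out : List (Int × Int)) : Prop := out = aggregate_by_mmio_id_alt bb_mmio_cnt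
instance (bb_mmio_cnt : List (Int × List (Int × Int))) (out : List (Int × Int)) : Decidable (Spec_aggregate_by_mmio_id bb_mmio_cnt out) := by unfold Spec_aggregate_by_mmio_id; infer_instance

-- ===== CLAIM (what is proved, stated in full; the proofs are below) =====
def Claim_equal_aggregate_by_mmio_id : Prop := ∀ (bb_mmio_cnt : List (Int × List (Int × Int))), Dom_aggregate_by_mmio_id bb_mmio_cnt → Pre_aggregate_by_mmio_id bb_mmio_cnt → Spec_aggregate_by_mmio_id bb_mmio_cnt (aggregate_by_mmio_id bb_mmio_cnt)

-- ===== LEMMAS AND PROOFS =====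

-- A's accumulation step on one (addr, cnt) pair
def pvStep (d : PySem.Dict Int Int) (q : Int × Int) : PySem.Dict Int Int :=
  d.insert q.1 (d.getD q.1 0 + q.2)

-- total count for address a in a flat pair list
def pvSum (ps : List (Int × Int)) (a : Int) : Int :=
  ((ps.filter (fun q => q.1 == a)).map (·.2)).sum

theorem pv_foldl_flat {α β σ : Type} (f : σ → β → σ) (l : List (α × List β)) (s : σ) :
    l.foldl (fun s p => p.2.foldl f s) s = (l.flatMap (·.2)).foldl f s := by
  induction l generalizing s with
  | nil => rfl
  | cons p t ih => simp [List.foldl_append, ih]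

theorem pv_getD_foldl_step (ps : List (Int × Int)) (d : PySem.Dict Int Int) (a : Int) :
    (ps.foldl pvStep d).getD a 0 = d.getD a 0 + pvSum ps a := by
  induction ps generalizing d with
  | nil => simp [pvSum]
  | cons q t ih =>
      simp only [List.foldl_cons, ih, pvStep, pvSum, List.filter_cons]
      rw [PySem.Dict.getD_insert]
      by_cases h : a = q.1
      · simp [h]; ring
      · have : (q.1 == a) = false := by simp [Ne.symm h]
        simp [h, this]

theorem pvSum_of_not_mem (ps : List (Int × Int)) (a : Int) (h : a ∉ ps.map Prod.fst) :
    pvSum ps a = 0 := by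
  unfold pvSum
  have : ps.filter (fun q => q.1 == a) = [] := by
    apply List.filter_eq_nil_iff.mpr
    intro q hq
    simp only [beq_iff_eq]
    intro he; exact h (he ▸ List.mem_map_of_mem hq)
  simp [this]

theorem pv_getD_mk (inner : List (Int × Int)) (a : Int)
    (h : (inner.map Prod.fst).Nodup) :
    (PySem.Dict.mk inner).getD a 0 = pvSum inner a := by
  induction inner with
  | nil => simp [pvSum, PySem.Dict.getD_eq_get?_getD]; rfl
  | cons q t ih =>
      simp only [List.map_cons, List.nodup_cons] at h
      rw [PySem.Dict.getD_eq_get?_getD, PySem.Dict.get?_mk_cons]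
      by_cases he : q.1 = a
      · simp [he, pvSum]
        simpa [pvSum] using pvSum_of_not_mem t a (he ▸ h.1)
      · have : (q.1 == a) = false := by simp [he]
        rw [this]
        simp only [Bool.false_eq_true, if_false]
        rw [← PySem.Dict.getD_eq_get?_getD, ih h.2]
        simp [pvSum, this]

theorem pv_sumfold (l : List (Int × List (Int × Int))) (a : Int) (s : Int)
    (h : ∀ p ∈ l, (p.2.map Prod.fst).Nodup) :
    l.foldl (fun s p => s + (PySem.Dict.mk p.2).getD a 0) s
      = s + pvSum (l.flatMap (·.2)) a := by
  induction l generalizing s with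
  | nil => simp [pvSum]
  | cons p t ih =>
      simp only [List.foldl_cons, List.flatMap_cons]
      rw [ih _ (fun q hq => h q (List.mem_cons_of_mem _ hq)),
          pv_getD_mk p.2 a (h p (List.mem_cons_self ..))]
      simp [pvSum, List.filter_append, add_assoc]

theorem pv_order_eq (ps : List (Int × Int)) :
    ps.foldl (fun ord q => if q.1 ∈ ord then ord else ord ++ [q.1]) ([] : List Int)
      = PySem.Set.ofList (ps.map Prod.fst) := by
  have h1 : ∀ (s : List Int),
      ps.foldl (fun ord q => if q.1 ∈ ord then ord else ord ++ [q.1]) s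
        = ps.foldl (fun ord q => PySem.Set.add ord q.1) s := by
    intro s
    induction ps generalizing s with
    | nil => rfl
    | cons q t ih => simp [PySem.Set.add_eq_ite, ih]
  rw [h1, ← PySem.Set.update_map_eq_foldl_add, PySem.Set.update_nil_left]

theorem aggregate_eq (l : List (Int × List (Int × Int)))
    (h : ∀ p ∈ l, (p.2.map Prod.fst).Nodup) :
    aggregate_by_mmio_id l = aggregate_by_mmio_id_alt l := by
  unfold aggregate_by_mmio_id aggregate_by_mmio_id_alt
  have hA : (l.foldl
      (fun (mmio_cnt : PySem.Dict Int Int) p =>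
        p.2.foldl (fun mc q => mc.insert q.1 (mc.getD q.1 0 + q.2)) mmio_cnt)
      PySem.Dict.empty)
      = (l.flatMap (·.2)).foldl pvStep PySem.Dict.empty := by
    rw [pv_foldl_flat]; rfl
  rw [hA, pv_foldl_flat]
  set ps := l.flatMap (·.2) with hps
  have hkeys : ((ps.foldl pvStep PySem.Dict.empty)).keys
      = PySem.Set.ofList (ps.map Prod.fst) := by
    have := PySem.Dict.keys_foldl_insert_key ps Prod.fst
      (fun d q => d.getD q.1 0 + q.2) PySem.Dict.empty
    simpa [pvStep, PySem.Set.update_nil_left, PySem.Dict.keys_empty] using this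
  have hnd : ((ps.foldl pvStep PySem.Dict.empty)).keys.Nodup := by
    rw [hkeys]; exact PySem.Set.nodup_ofList _
  rw [PySem.Dict.items_eq_map_keys _ hnd 0, hkeys, pv_order_eq]
  apply List.map_congr_left
  intro a _
  rw [pv_getD_foldl_step, pv_sumfold l a 0 h, hps]
  simp [PySem.Dict.getD_empty]

-- ===== VERDICT (by name: the statement is the Claim_ definition above) =====
theorem aggregate_by_mmio_id_spec : Claim_equal_aggregate_by_mmio_id := by
  intro l _ hpre
  unfold Spec_aggregate_by_mmio_id
  exact aggregate_eq l hpre.2
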